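-- pv_equiv track=rewrite | github.com/JontyWilson/Personal-Projects | GoogleFoobar/en_route.py | solution
-- ===== SOURCE A (Python) =====
-- def solution(s):
--
--     collisions = 0
--     leftBefore = 0
--
--     for x in s:
--         if x == '>':
--             leftBefore += 1
--         elif x == '<' and leftBefore > 0:
--             collisions += leftBefore
--
--     return collisions*2
-- ===== SOURCE B (Python) =====
-- def solution(s):
--     arrows = [c for c in s if c in '<>']
--     less_positions = [i for i, c in enumerate(arrows) if c == '<']
--     return 2 * sum(i - r for r, i in enumerate(less_positions))
-- ===== Notes on version B (the rewrite author's own statement) =====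
-- stated objective: faster
-- what changed: Instead of A's running counter of right-movers accumulated at each left-mover, B filters out non-arrow characters, collects the arrow-indices of the left-movers, and sums the closed formula (index minus rank) giving the number of right-movers before each, then doubles.
import Mathlib
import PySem

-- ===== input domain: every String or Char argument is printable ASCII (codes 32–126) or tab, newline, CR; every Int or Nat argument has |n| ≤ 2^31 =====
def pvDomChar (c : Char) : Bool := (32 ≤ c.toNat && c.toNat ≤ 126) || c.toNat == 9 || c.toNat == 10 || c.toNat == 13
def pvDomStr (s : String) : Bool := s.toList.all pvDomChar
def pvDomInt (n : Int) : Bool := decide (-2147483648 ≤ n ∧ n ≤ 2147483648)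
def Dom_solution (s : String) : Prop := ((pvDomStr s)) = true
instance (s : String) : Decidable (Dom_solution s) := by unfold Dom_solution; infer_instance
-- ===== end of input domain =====

-- B replaces A's running-counter pass by filtering the arrow characters, taking the
-- arrow-indices of the left-movers, and summing the closed formula (index minus rank).

-- ===== PORT A =====
-- single pass; state = (collisions, leftBefore)
def solution (s : String) : Int :=
  let r := s.toList.foldl
    (fun (p : Int × Int) x =>
      if x = '>' then (p.1, p.2 + 1)
      else if x = '<' ∧ 0 < p.2 then (p.1 + p.2, p.2)
      else p)
    (0, 0)
  r.1 * 2

-- ===== PORT B =====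
-- Source B: arrows = [c for c in s if c in '<>']; less_positions = [i for i,c in enumerate(arrows) if c=='<'];
--       return 2 * sum(i - r for r,i in enumerate(less_positions))
def solution_alt (s : String) : Int :=
  let arrows := s.toList.filter (fun c => c = '<' ∨ c = '>')
  let lessPositions := (PySem.List.enumerate arrows 0).filterMap
    (fun p => if p.2 = '<' then some p.1 else none)
  2 * ((PySem.List.enumerate lessPositions 0).map (fun p => p.2 - p.1)).sum

-- ===== PRECONDITION & SPEC =====
def Spec_solution (s : String) (out : Int) : Prop := out = solution_alt s
instance (s : String) (out : Int) : Decidable (Spec_solution s out) := by unfold Spec_solution; infer_instance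

-- ===== CLAIM (what is proved, stated in full; the proofs are below) =====
def Claim_equal_solution : Prop := ∀ (s : String), Dom_solution s → Spec_solution s (solution s)

-- ===== LEMMAS AND PROOFS =====

-- the common value: for each '>' the number of '<' after it
def pairsFn : List Char → Int
  | [] => 0
  | x :: xs => (if x = '>' then (PySem.List.count xs '<' : Int) else 0) + pairsFn xs

theorem keyA (cs : List Char) (c l : Int) (hl : 0 ≤ l) :
    (cs.foldl
      (fun (p : Int × Int) x =>
        if x = '>' then (p.1, p.2 + 1)
        else if x = '<' ∧ 0 < p.2 then (p.1 + p.2, p.2)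
        else p)
      (c, l)).1
    = c + l * (PySem.List.count cs '<' : Int) + pairsFn cs := by
  induction cs generalizing c l with
  | nil => simp [PySem.List.count, pairsFn]
  | cons x xs ih =>
    simp only [List.foldl_cons, pairsFn]
    by_cases hgt : x = '>'
    · have hne : x ≠ '<' := by simp [hgt]
      rw [if_pos hgt, if_pos hgt, ih c (l + 1) (by omega)]
      simp [PySem.List.count_eq, List.count_cons, hne]
      push_cast
      ring
    · rw [if_neg hgt, if_neg hgt]
      by_cases hlt : x = '<'
      · have hcnt : (PySem.List.count (x :: xs) '<' : Int)
            = (PySem.List.count xs '<' : Int) + 1 := by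
          simp [PySem.List.count_eq, List.count_cons, hlt]
        by_cases hpos : 0 < l
        · rw [if_pos ⟨hlt, hpos⟩, ih (c + l) l hl, hcnt]
          ring
        · have hl0 : l = 0 := by omega
          rw [if_neg (by exact fun h => hpos h.2), ih c l hl, hcnt, hl0]
          ring
      · have hcnt : (PySem.List.count (x :: xs) '<' : Int)
            = (PySem.List.count xs '<' : Int) := by
          simp [PySem.List.count_eq, List.count_cons, hlt]
        rw [if_neg (fun h => hlt h.1), ih c l hl, hcnt]
        ring

theorem count_filter_arrows (cs : List Char) :
    PySem.List.count (cs.filter (fun c => c = '<' ∨ c = '>')) '<'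
      = PySem.List.count cs '<' := by
  induction cs with
  | nil => rfl
  | cons x xs ih =>
    by_cases hp : (x = '<' ∨ x = '>')
    · rw [List.filter_cons, if_pos (by simpa using hp)]
      simp only [PySem.List.count_eq, List.count_cons] at ih ⊢
      rw [ih]
    · have hne : x ≠ '<' := fun h => hp (Or.inl h)
      rw [List.filter_cons, if_neg (by simpa using hp)]
      simp only [PySem.List.count_eq, List.count_cons] at ih ⊢
      simp [hne, ih]

theorem pairs_filter_arrows (cs : List Char) :
    pairsFn (cs.filter (fun c => c = '<' ∨ c = '>')) = pairsFn cs := by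
  induction cs with
  | nil => rfl
  | cons x xs ih =>
    by_cases hp : (x = '<' ∨ x = '>')
    · simp only [List.filter_cons, decide_eq_true_eq, if_pos hp, pairsFn,
        count_filter_arrows, ih]
    · have hne : x ≠ '>' := fun h => hp (Or.inr h)
      simp only [List.filter_cons, decide_eq_true_eq, if_neg hp, pairsFn, ih,
        if_neg hne, zero_add]

theorem keyB (l : List Char) (s r : Int)
    (hall : ∀ c ∈ l, c = '<' ∨ c = '>') :
    ((PySem.List.enumerate
        ((PySem.List.enumerate l s).filterMap
          (fun p => if p.2 = '<' then some p.1 else none)) r).map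
      (fun p => p.2 - p.1)).sum
    = pairsFn l + (s - r) * (PySem.List.count l '<' : Int) := by
  induction l generalizing s r with
  | nil => simp [PySem.List.enumerate_nil, pairsFn, PySem.List.count]
  | cons x xs ih =>
    have hall' : ∀ c ∈ xs, c = '<' ∨ c = '>' := fun c hc => hall c (List.mem_cons_of_mem _ hc)
    rw [PySem.List.enumerate_cons]
    rcases hall x List.mem_cons_self with hlt | hgt
    · subst hlt
      have hred : List.filterMap (fun (p : Int × Char) => if p.2 = '<' then some p.1 else none)
            ((s, '<') :: PySem.List.enumerate xs (s + 1))
          = s :: List.filterMap (fun (p : Int × Char) => if p.2 = '<' then some p.1 else none)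
            (PySem.List.enumerate xs (s + 1)) := by simp
      have hcnt : (PySem.List.count ('<' :: xs) '<' : Int)
          = (PySem.List.count xs '<' : Int) + 1 := by
        simp [PySem.List.count_eq, List.count_cons]
      rw [hred, PySem.List.enumerate_cons, List.map_cons, List.sum_cons,
        ih (s + 1) (r + 1) hall', hcnt]
      simp only [pairsFn]
      rw [if_neg (show ('<' : Char) ≠ '>' by decide)]
      ring
    · subst hgt
      have hred : List.filterMap (fun (p : Int × Char) => if p.2 = '<' then some p.1 else none)
            ((s, '>') :: PySem.List.enumerate xs (s + 1))
          = List.filterMap (fun (p : Int × Char) => if p.2 = '<' then some p.1 else none)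
            (PySem.List.enumerate xs (s + 1)) := by simp
      have hcnt : (PySem.List.count ('>' :: xs) '<' : Int)
          = (PySem.List.count xs '<' : Int) := by
        simp [PySem.List.count_eq, List.count_cons]
      rw [hred, ih (s + 1) r hall', hcnt]
      simp only [pairsFn, if_true]
      ring

-- ===== VERDICT (by name: the statement is the Claim_ definition above) =====
theorem solution_spec : Claim_equal_solution := by
  intro s _
  unfold Spec_solution solution solution_alt
  show (List.foldl
      (fun (p : Int × Int) x =>
        if x = '>' then (p.1, p.2 + 1)
        else if x = '<' ∧ 0 < p.2 then (p.1 + p.2, p.2)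
        else p) (0, 0) s.toList).1 * 2
    = 2 * ((PySem.List.enumerate
        ((PySem.List.enumerate (s.toList.filter (fun c => c = '<' ∨ c = '>')) 0).filterMap
          (fun p => if p.2 = '<' then some p.1 else none)) 0).map
      (fun p => p.2 - p.1)).sum
  rw [keyA s.toList 0 0 le_rfl,
    keyB (s.toList.filter (fun c => c = '<' ∨ c = '>')) 0 0
      (by intro c hc; have := List.of_mem_filter hc; simpa using this),
    pairs_filter_arrows]
  ring
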